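-- pv_equiv track=rewrite | github.com/smilstea/IOS-XR-Maintenance-Window-Checker | ios_xr_mw_comparer.py | show_dhcp_ipv4_proxy_binding_summary_totals
-- ===== SOURCE A (Python) =====
-- def show_dhcp_ipv4_proxy_binding_summary_totals(sh_cmd_dict):
--     ###__author__     = "Sam Milstead"
--     ###__copyright__  = "Copyright 2020 (C) Cisco TAC"
--     ###__version__    = "1.1.3"
--     ###__status__     = "alpha"
--     #Perform some magic on the pre and post lines of output for show dhcp ipv4 proxy binding summary
--     #Each line being an item in a list
--     #Determine if bindings changes
--     counters = {'DHCP Total Sessions': 0, 'DHCP INIT Sessions': 0, 'DHCP INIT_DPM_WAITING Sessions': 0, 'DHCP SELECTING Sessions': 0, 'DHCP OFFER_SENT Sessions': 0, 'DHCP REQUESTING Sessions': 0, 'DHCP REQUEST_INIT_DPM_WAITING Sessions': 0, 'DHCP ACK_DPM_WAITING Sessions': 0, 'DHCP BOUND Sessions': 0,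
--                 'DHCP RENEWING Sessions': 0, 'DHCP INFORMING Sessions': 0, 'DHCP REAUTHORIZE Sessions': 0, 'DHCP DISCONNECT_DPM_WAIT Sessions': 0, 'DHCP ADDR_CHANGE_DPM_WAIT Sessions': 0, 'DHCP DELETING Sessions': 0, 'DHCP DISCONNECTED Sessions': 0, 'DHCP RESTARTING Sessions': 0}
--     for key in sh_cmd_dict:
--         value = sh_cmd_dict[key]
--         if key == 'Total':
--             counters['DHCP Total Sessions'] = value
--         elif key == 'INIT':
--             counters['DHCP INIT Sessions'] = value
--         elif key == 'INIT_DPM_WAITING':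
--             counters['DHCP INIT_DPM_WAITING Sessions']  = value
--         elif key == 'SELECTING':
--             counters['DHCP SELECTING Sessions']  = value
--         elif key == 'OFFER_SENT':
--             counters['DHCP OFFER_SENT Sessions']  = value
--         elif key == 'REQUESTING':
--             counters['DHCP REQUESTING Sessions']  = value
--         elif key == 'REQUEST_INIT_DPM_WAITING':
--             counters['DHCP REQUEST_INIT_DPM_WAITING Sessions']  = value
--         elif key == 'ACK_DPM_WAITING':
--             counters['DHCP ACK_DPM_WAITING Sessions']  = value
--         elif key == 'BOUND':
--             counters['DHCP BOUND Sessions']  = value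
--         elif key == 'RENEWING':
--             counters['DHCP RENEWING Sessions']  = value
--         elif key == 'INFORMING':
--             counters['DHCP INFORMING Sessions']  = value
--         elif key == 'REAUTHORIZE':
--             counters['DHCP REAUTHORIZE Sessions']  = value
--         elif key == 'DISCONNECT_DPM_WAIT':
--             counters['DHCP DISCONNECT_DPM_WAIT Sessions']  = value
--         elif key == 'ADDR_CHANGE_DPM_WAIT':
--             counters['DHCP ADDR_CHANGE_DPM_WAIT Sessions']  = value
--         elif key == 'DELETING':
--             counters['DHCP DELETING Sessions']  = value
--         elif key == 'DISCONNECTED':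
--             counters['DHCP DISCONNECTED Sessions']  = value
--         elif key == 'RESTARTING':
--             counters['DHCP RESTARTING Sessions']  = value
--     return counters
-- ===== SOURCE B (Python) =====
-- _STATES = ('Total', 'INIT', 'INIT_DPM_WAITING', 'SELECTING', 'OFFER_SENT', 'REQUESTING',
--            'REQUEST_INIT_DPM_WAITING', 'ACK_DPM_WAITING', 'BOUND', 'RENEWING', 'INFORMING',
--            'REAUTHORIZE', 'DISCONNECT_DPM_WAIT', 'ADDR_CHANGE_DPM_WAIT', 'DELETING',
--            'DISCONNECTED', 'RESTARTING')
--
--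
-- def show_dhcp_ipv4_proxy_binding_summary_totals(sh_cmd_dict):
--     # Inverted traversal: instead of scanning the input and dispatching on each of
--     # its keys, iterate the fixed 17-entry output template and look each state up
--     # in the input with .get(s, 0) -- absent states keep their zero.
--     return {'DHCP ' + s + ' Sessions': sh_cmd_dict.get(s, 0) for s in _STATES}
-- ===== Notes on version B (the rewrite author's own statement) =====
-- stated objective: alternative
-- what changed: B inverts the traversal: instead of scanning the whole input dict and dispatching each key through a 17-branch elif chain into a pre-zeroed dict, it builds the result with one dict comprehension over the fixed 17-state template, looking each state up with .get(s, 0).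
import Mathlib
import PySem

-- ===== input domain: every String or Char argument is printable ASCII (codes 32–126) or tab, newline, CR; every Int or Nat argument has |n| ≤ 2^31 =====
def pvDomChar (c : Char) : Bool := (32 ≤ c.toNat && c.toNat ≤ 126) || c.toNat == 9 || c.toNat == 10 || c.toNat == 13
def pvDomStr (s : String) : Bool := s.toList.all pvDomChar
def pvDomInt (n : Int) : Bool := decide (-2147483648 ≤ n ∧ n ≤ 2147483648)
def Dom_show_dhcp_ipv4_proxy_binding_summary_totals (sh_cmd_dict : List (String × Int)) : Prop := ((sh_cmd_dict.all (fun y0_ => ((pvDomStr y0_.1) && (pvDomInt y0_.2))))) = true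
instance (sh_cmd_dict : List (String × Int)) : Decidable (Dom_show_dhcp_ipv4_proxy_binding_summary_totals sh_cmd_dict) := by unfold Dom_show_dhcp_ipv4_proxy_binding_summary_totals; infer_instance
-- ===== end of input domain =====

-- B inverts the traversal: it iterates the fixed 17-state output template and looks each
-- state up in the input with get(s, 0), instead of scanning the input and dispatching each
-- key through a 17-branch elif chain; objective: alternative. Return value only; no mutation.

-- ===== PORT A =====
-- literal transliteration: the zero-initialised counters dict, then `for key in sh_cmd_dict`
-- with the 17-branch elif chain.  `value = sh_cmd_dict[key]` is ported as getD 0: key is drawn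
-- from the dict itself, so the lookup always succeeds and the default 0 is unreachable (exact).
def show_dhcp_ipv4_proxy_binding_summary_totals (sh_cmd_dict : List (String × Int)) : List (String × Int) :=
  let counters : PySem.Dict String Int := PySem.Dict.ofList
    [("DHCP Total Sessions", 0), ("DHCP INIT Sessions", 0), ("DHCP INIT_DPM_WAITING Sessions", 0),
     ("DHCP SELECTING Sessions", 0), ("DHCP OFFER_SENT Sessions", 0), ("DHCP REQUESTING Sessions", 0),
     ("DHCP REQUEST_INIT_DPM_WAITING Sessions", 0), ("DHCP ACK_DPM_WAITING Sessions", 0),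
     ("DHCP BOUND Sessions", 0), ("DHCP RENEWING Sessions", 0), ("DHCP INFORMING Sessions", 0),
     ("DHCP REAUTHORIZE Sessions", 0), ("DHCP DISCONNECT_DPM_WAIT Sessions", 0),
     ("DHCP ADDR_CHANGE_DPM_WAIT Sessions", 0), ("DHCP DELETING Sessions", 0),
     ("DHCP DISCONNECTED Sessions", 0), ("DHCP RESTARTING Sessions", 0)]
  (sh_cmd_dict.foldl (fun counters p =>
    let key := p.1
    let value := (PySem.Dict.mk sh_cmd_dict).getD key 0
    if key = "Total" then counters.insert "DHCP Total Sessions" value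
    else if key = "INIT" then counters.insert "DHCP INIT Sessions" value
    else if key = "INIT_DPM_WAITING" then counters.insert "DHCP INIT_DPM_WAITING Sessions" value
    else if key = "SELECTING" then counters.insert "DHCP SELECTING Sessions" value
    else if key = "OFFER_SENT" then counters.insert "DHCP OFFER_SENT Sessions" value
    else if key = "REQUESTING" then counters.insert "DHCP REQUESTING Sessions" value
    else if key = "REQUEST_INIT_DPM_WAITING" then counters.insert "DHCP REQUEST_INIT_DPM_WAITING Sessions" value
    else if key = "ACK_DPM_WAITING" then counters.insert "DHCP ACK_DPM_WAITING Sessions" value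
    else if key = "BOUND" then counters.insert "DHCP BOUND Sessions" value
    else if key = "RENEWING" then counters.insert "DHCP RENEWING Sessions" value
    else if key = "INFORMING" then counters.insert "DHCP INFORMING Sessions" value
    else if key = "REAUTHORIZE" then counters.insert "DHCP REAUTHORIZE Sessions" value
    else if key = "DISCONNECT_DPM_WAIT" then counters.insert "DHCP DISCONNECT_DPM_WAIT Sessions" value
    else if key = "ADDR_CHANGE_DPM_WAIT" then counters.insert "DHCP ADDR_CHANGE_DPM_WAIT Sessions" value
    else if key = "DELETING" then counters.insert "DHCP DELETING Sessions" value
    else if key = "DISCONNECTED" then counters.insert "DHCP DISCONNECTED Sessions" value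
    else if key = "RESTARTING" then counters.insert "DHCP RESTARTING Sessions" value
    else counters) counters).items

-- ===== PORT B =====
-- the module-level _STATES tuple of Source B
def pvStates : List String :=
  ["Total", "INIT", "INIT_DPM_WAITING", "SELECTING", "OFFER_SENT", "REQUESTING",
   "REQUEST_INIT_DPM_WAITING", "ACK_DPM_WAITING", "BOUND", "RENEWING", "INFORMING",
   "REAUTHORIZE", "DISCONNECT_DPM_WAIT", "ADDR_CHANGE_DPM_WAIT", "DELETING",
   "DISCONNECTED", "RESTARTING"]

-- Source B: one dict comprehension over _STATES (ported as the fold building the dict entry by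
-- entry), looking each state up in the input with sh_cmd_dict.get(s, 0).
def show_dhcp_ipv4_proxy_binding_summary_totals_alt (sh_cmd_dict : List (String × Int)) : List (String × Int) :=
  (pvStates.foldl (fun d s =>
      d.insert ("DHCP " ++ s ++ " Sessions") ((PySem.Dict.mk sh_cmd_dict).getD s 0))
    PySem.Dict.empty).items

-- ===== PRECONDITION & SPEC =====
def Spec_show_dhcp_ipv4_proxy_binding_summary_totals (sh_cmd_dict : List (String × Int)) (out : List (String × Int)) : Prop := out = show_dhcp_ipv4_proxy_binding_summary_totals_alt sh_cmd_dict
instance (sh_cmd_dict : List (String × Int)) (out : List (String × Int)) : Decidable (Spec_show_dhcp_ipv4_proxy_binding_summary_totals sh_cmd_dict out) := by unfold Spec_show_dhcp_ipv4_proxy_binding_summary_totals; infer_instance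

-- ===== CLAIM (what is proved, stated in full; the proofs are below) =====
def Claim_equal_show_dhcp_ipv4_proxy_binding_summary_totals : Prop := ∀ (sh_cmd_dict : List (String × Int)), Dom_show_dhcp_ipv4_proxy_binding_summary_totals sh_cmd_dict → Spec_show_dhcp_ipv4_proxy_binding_summary_totals sh_cmd_dict (show_dhcp_ipv4_proxy_binding_summary_totals sh_cmd_dict)

-- ===== LEMMAS AND PROOFS =====

-- the output key for a state
def pvName (s : String) : String := "DHCP " ++ s ++ " Sessions"

-- the 17-key template dict under an arbitrary valuation v of the states
def pvTpl (v : String → Int) : PySem.Dict String Int :=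
  PySem.Dict.mk (pvStates.map (fun s => (pvName s, v s)))

-- A's 17-branch elif chain equals the computed-key step
theorem pv_step_eq (sh : List (String × Int)) (c : PySem.Dict String Int) (p : String × Int) :
     (if p.1 = "Total" then c.insert "DHCP Total Sessions" ((PySem.Dict.mk sh).getD p.1 0)
     else if p.1 = "INIT" then c.insert "DHCP INIT Sessions" ((PySem.Dict.mk sh).getD p.1 0)
     else if p.1 = "INIT_DPM_WAITING" then c.insert "DHCP INIT_DPM_WAITING Sessions" ((PySem.Dict.mk sh).getD p.1 0)
     else if p.1 = "SELECTING" then c.insert "DHCP SELECTING Sessions" ((PySem.Dict.mk sh).getD p.1 0)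
     else if p.1 = "OFFER_SENT" then c.insert "DHCP OFFER_SENT Sessions" ((PySem.Dict.mk sh).getD p.1 0)
     else if p.1 = "REQUESTING" then c.insert "DHCP REQUESTING Sessions" ((PySem.Dict.mk sh).getD p.1 0)
     else if p.1 = "REQUEST_INIT_DPM_WAITING" then c.insert "DHCP REQUEST_INIT_DPM_WAITING Sessions" ((PySem.Dict.mk sh).getD p.1 0)
     else if p.1 = "ACK_DPM_WAITING" then c.insert "DHCP ACK_DPM_WAITING Sessions" ((PySem.Dict.mk sh).getD p.1 0)
     else if p.1 = "BOUND" then c.insert "DHCP BOUND Sessions" ((PySem.Dict.mk sh).getD p.1 0)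
     else if p.1 = "RENEWING" then c.insert "DHCP RENEWING Sessions" ((PySem.Dict.mk sh).getD p.1 0)
     else if p.1 = "INFORMING" then c.insert "DHCP INFORMING Sessions" ((PySem.Dict.mk sh).getD p.1 0)
     else if p.1 = "REAUTHORIZE" then c.insert "DHCP REAUTHORIZE Sessions" ((PySem.Dict.mk sh).getD p.1 0)
     else if p.1 = "DISCONNECT_DPM_WAIT" then c.insert "DHCP DISCONNECT_DPM_WAIT Sessions" ((PySem.Dict.mk sh).getD p.1 0)
     else if p.1 = "ADDR_CHANGE_DPM_WAIT" then c.insert "DHCP ADDR_CHANGE_DPM_WAIT Sessions" ((PySem.Dict.mk sh).getD p.1 0)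
     else if p.1 = "DELETING" then c.insert "DHCP DELETING Sessions" ((PySem.Dict.mk sh).getD p.1 0)
     else if p.1 = "DISCONNECTED" then c.insert "DHCP DISCONNECTED Sessions" ((PySem.Dict.mk sh).getD p.1 0)
     else if p.1 = "RESTARTING" then c.insert "DHCP RESTARTING Sessions" ((PySem.Dict.mk sh).getD p.1 0)
     else c)
    =
    (if p.1 ∈ pvStates then
       c.insert (pvName p.1) ((PySem.Dict.mk sh).getD p.1 0)
     else c) := by
  obtain ⟨k, v⟩ := p
  simp only [pvName]
  by_cases hm : k ∈ pvStates
  · fin_cases hm <;> simp [pvStates]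
  · simp only [pvStates, List.mem_cons, List.not_mem_nil, or_false] at hm
    push Not at hm
    obtain ⟨h1, h2, h3, h4, h5, h6, h7, h8, h9, h10, h11, h12, h13, h14, h15, h16, h17⟩ := hm
    simp [pvStates, h1, h2, h3, h4, h5, h6, h7, h8, h9, h10, h11, h12, h13, h14, h15, h16, h17]

-- the whole fold rewritten to the computed-key step
theorem pv_fold_eq (sh : List (String × Int)) (init : PySem.Dict String Int) :
    List.foldl (fun c (p : String × Int) =>
        if p.1 = "Total" then c.insert "DHCP Total Sessions" ((PySem.Dict.mk sh).getD p.1 0)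
        else if p.1 = "INIT" then c.insert "DHCP INIT Sessions" ((PySem.Dict.mk sh).getD p.1 0)
        else if p.1 = "INIT_DPM_WAITING" then c.insert "DHCP INIT_DPM_WAITING Sessions" ((PySem.Dict.mk sh).getD p.1 0)
        else if p.1 = "SELECTING" then c.insert "DHCP SELECTING Sessions" ((PySem.Dict.mk sh).getD p.1 0)
        else if p.1 = "OFFER_SENT" then c.insert "DHCP OFFER_SENT Sessions" ((PySem.Dict.mk sh).getD p.1 0)
        else if p.1 = "REQUESTING" then c.insert "DHCP REQUESTING Sessions" ((PySem.Dict.mk sh).getD p.1 0)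
        else if p.1 = "REQUEST_INIT_DPM_WAITING" then c.insert "DHCP REQUEST_INIT_DPM_WAITING Sessions" ((PySem.Dict.mk sh).getD p.1 0)
        else if p.1 = "ACK_DPM_WAITING" then c.insert "DHCP ACK_DPM_WAITING Sessions" ((PySem.Dict.mk sh).getD p.1 0)
        else if p.1 = "BOUND" then c.insert "DHCP BOUND Sessions" ((PySem.Dict.mk sh).getD p.1 0)
        else if p.1 = "RENEWING" then c.insert "DHCP RENEWING Sessions" ((PySem.Dict.mk sh).getD p.1 0)
        else if p.1 = "INFORMING" then c.insert "DHCP INFORMING Sessions" ((PySem.Dict.mk sh).getD p.1 0)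
        else if p.1 = "REAUTHORIZE" then c.insert "DHCP REAUTHORIZE Sessions" ((PySem.Dict.mk sh).getD p.1 0)
        else if p.1 = "DISCONNECT_DPM_WAIT" then c.insert "DHCP DISCONNECT_DPM_WAIT Sessions" ((PySem.Dict.mk sh).getD p.1 0)
        else if p.1 = "ADDR_CHANGE_DPM_WAIT" then c.insert "DHCP ADDR_CHANGE_DPM_WAIT Sessions" ((PySem.Dict.mk sh).getD p.1 0)
        else if p.1 = "DELETING" then c.insert "DHCP DELETING Sessions" ((PySem.Dict.mk sh).getD p.1 0)
        else if p.1 = "DISCONNECTED" then c.insert "DHCP DISCONNECTED Sessions" ((PySem.Dict.mk sh).getD p.1 0)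
        else if p.1 = "RESTARTING" then c.insert "DHCP RESTARTING Sessions" ((PySem.Dict.mk sh).getD p.1 0)
        else c) init sh
    = List.foldl (fun c (p : String × Int) =>
        if p.1 ∈ pvStates then c.insert (pvName p.1) ((PySem.Dict.mk sh).getD p.1 0) else c) init sh :=
  PySem.List.foldl_congr_mem sh _ _ init (fun c p _ => pv_step_eq sh c p)

-- inserting at a template key rewrites the template in place
theorem pv_insert_tpl (v : String → Int) (s : String) (hs : s ∈ pvStates) (x : Int) :
    (pvTpl v).insert (pvName s) x = pvTpl (fun t => if t = s then x else v t) := by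
  fin_cases hs <;>
    · apply PySem.Dict.ext
      simp [pvTpl, pvName, pvStates, PySem.Dict.items_insert, PySem.Dict.contains]

-- the computed-key fold over any list keeps the template shape, with the states seen so far
-- taking their final looked-up value
theorem pv_foldl_tpl (sh : List (String × Int)) :
    ∀ (l : List (String × Int)) (v : String → Int),
      (l.foldl (fun c p =>
          if p.1 ∈ pvStates then c.insert (pvName p.1) ((PySem.Dict.mk sh).getD p.1 0) else c)
        (pvTpl v))
      = pvTpl (fun s => if s ∈ l.map Prod.fst then (PySem.Dict.mk sh).getD s 0 else v s) := by
  intro l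
  induction l with
  | nil => intro v; simp
  | cons p l ih =>
    intro v
    obtain ⟨k, kv⟩ := p
    simp only [List.foldl_cons]
    by_cases hk : k ∈ pvStates
    · rw [if_pos hk, pv_insert_tpl v k hk, ih]
      unfold pvTpl
      congr 1
      apply List.map_congr_left
      intro s _
      by_cases h1 : s ∈ l.map Prod.fst
      · simp [h1]
      · by_cases h2 : s = k <;> simp [h1, h2]
    · rw [if_neg hk, ih]
      unfold pvTpl
      congr 1
      apply List.map_congr_left
      intro s hsm
      have hsk : s ≠ k := fun h => hk (h ▸ hsm)
      by_cases h1 : s ∈ l.map Prod.fst <;> simp [h1, hsk]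

-- for a state absent from the input's keys, getD returns the default 0
theorem pv_getD_absent (sh : List (String × Int)) (s : String)
    (h : s ∉ sh.map Prod.fst) : (PySem.Dict.mk sh).getD s 0 = 0 := by
  apply PySem.Dict.getD_of_not_contains
  rw [PySem.Dict.contains_eq_decide_mem_keys]
  simpa [PySem.Dict.keys] using h

-- ===== VERDICT (by name: the statement is the Claim_ definition above) =====
theorem show_dhcp_ipv4_proxy_binding_summary_totals_spec : Claim_equal_show_dhcp_ipv4_proxy_binding_summary_totals := by
  intro sh _
  unfold Spec_show_dhcp_ipv4_proxy_binding_summary_totals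
  unfold show_dhcp_ipv4_proxy_binding_summary_totals show_dhcp_ipv4_proxy_binding_summary_totals_alt
  -- A's side: rewrite the step to the computed form, then apply the fold lemma from the
  -- zero template
  have hinit : PySem.Dict.ofList
      ([("DHCP Total Sessions", 0), ("DHCP INIT Sessions", 0), ("DHCP INIT_DPM_WAITING Sessions", 0),
        ("DHCP SELECTING Sessions", 0), ("DHCP OFFER_SENT Sessions", 0), ("DHCP REQUESTING Sessions", 0),
        ("DHCP REQUEST_INIT_DPM_WAITING Sessions", 0), ("DHCP ACK_DPM_WAITING Sessions", 0),
        ("DHCP BOUND Sessions", 0), ("DHCP RENEWING Sessions", 0), ("DHCP INFORMING Sessions", 0),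
        ("DHCP REAUTHORIZE Sessions", 0), ("DHCP DISCONNECT_DPM_WAIT Sessions", 0),
        ("DHCP ADDR_CHANGE_DPM_WAIT Sessions", 0), ("DHCP DELETING Sessions", 0),
        ("DHCP DISCONNECTED Sessions", 0), ("DHCP RESTARTING Sessions", 0)] : List (String × Int))
      = pvTpl (fun _ => 0) := by decide
  simp only []
  refine Eq.trans (congrArg PySem.Dict.items (pv_fold_eq sh _)) ?_
  rw [hinit, pv_foldl_tpl sh sh (fun _ => 0)]
  -- B's side: a fold over fresh distinct keys appends its 17 entries to the empty dict
  have hB : (List.foldl (fun d s =>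
        d.insert ("DHCP " ++ s ++ " Sessions") ((PySem.Dict.mk sh).getD s 0))
        PySem.Dict.empty pvStates).items
      = (PySem.Dict.empty : PySem.Dict String Int).items
        ++ pvStates.map (fun s => ("DHCP " ++ s ++ " Sessions", (PySem.Dict.mk sh).getD s 0)) := by
    apply PySem.Dict.items_foldl_insert_fresh <;> decide
  rw [hB]
  show pvStates.map (fun s => (pvName s, if s ∈ sh.map Prod.fst then (PySem.Dict.mk sh).getD s 0 else 0))
      = (PySem.Dict.empty : PySem.Dict String Int).items
        ++ pvStates.map (fun s => ("DHCP " ++ s ++ " Sessions", (PySem.Dict.mk sh).getD s 0))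
  rw [show (PySem.Dict.empty : PySem.Dict String Int).items = [] from rfl, List.nil_append]
  apply List.map_congr_left
  intro s _
  by_cases h : s ∈ sh.map Prod.fst
  · simp [pvName, h]
  · simp [pvName, h, pv_getD_absent sh s h]
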